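-- pv_equiv track=rewrite | github.com/bettyabay/tenacious-bench | data/contamination/contamination_check.py | check_probe_isolation
-- ===== SOURCE A (Python) =====
-- TARGET_PROBES = [
--     "PROBE-A07", "PROBE-E01", "PROBE-E02", "PROBE-E03",
--     "PROBE-G03", "PROBE-B03", "PROBE-B04", "PROBE-D05",
-- ]
--
-- def check_probe_isolation(held_out: list[dict]) -> list[dict]:
--     violations = []
--     covered = {p["probe_id"] for p in held_out}
--     for probe in TARGET_PROBES:
--         if probe not in covered:
--             violations.append({
--                 "check": "probe_isolation",
--                 "missing_probe": probe,
--                 "detail": f"held_out has no pairs for {probe}",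
--             })
--     return violations
-- ===== SOURCE B (Python) =====
-- TARGET_PROBES = [
--     "PROBE-A07", "PROBE-E01", "PROBE-E02", "PROBE-E03",
--     "PROBE-G03", "PROBE-B03", "PROBE-B04", "PROBE-D05",
-- ]
--
-- def check_probe_isolation(held_out: list[dict]) -> list[dict]:
--     # Inverted traversal: a single pass over held_out subtracts each seen
--     # probe_id from the ordered list of still-missing targets; whatever
--     # survives the pass is exactly the violations, in TARGET_PROBES order.
--     remaining = list(TARGET_PROBES)
--     for p in held_out:
--         pid = p["probe_id"]
--         if pid in remaining:
--             remaining.remove(pid)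
--     return [
--         {
--             "check": "probe_isolation",
--             "missing_probe": probe,
--             "detail": f"held_out has no pairs for {probe}",
--         }
--         for probe in remaining
--     ]
-- ===== Notes on version B (the rewrite author's own statement) =====
-- stated objective: alternative
-- what changed: Inverts the traversal: instead of building a 'covered' set and looping over TARGET_PROBES testing membership, B makes one pass over held_out subtracting each seen probe_id from an ordered 'remaining' worklist of targets, then maps the survivors to violation dicts.
import Mathlib
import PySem

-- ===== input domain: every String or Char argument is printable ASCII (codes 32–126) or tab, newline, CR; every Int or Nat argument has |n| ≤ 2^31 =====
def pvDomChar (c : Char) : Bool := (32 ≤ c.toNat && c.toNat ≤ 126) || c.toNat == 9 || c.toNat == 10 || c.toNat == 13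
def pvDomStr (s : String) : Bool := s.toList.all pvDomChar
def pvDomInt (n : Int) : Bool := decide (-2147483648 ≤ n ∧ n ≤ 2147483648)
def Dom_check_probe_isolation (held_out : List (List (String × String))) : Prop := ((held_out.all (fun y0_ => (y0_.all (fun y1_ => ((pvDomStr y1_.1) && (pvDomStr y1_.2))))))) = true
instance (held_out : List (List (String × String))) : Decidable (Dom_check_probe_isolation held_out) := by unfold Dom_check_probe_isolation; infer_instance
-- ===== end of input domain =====

-- B inverts A's traversal: one pass over held_out subtracts seen probe_ids from an ordered
-- worklist of targets, then maps the survivors to violation dicts (return value only, no mutation).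

-- ===== PORT A =====
def TARGET_PROBES : List String :=
  ["PROBE-A07", "PROBE-E01", "PROBE-E02", "PROBE-E03",
   "PROBE-G03", "PROBE-B03", "PROBE-B04", "PROBE-D05"]

def pvViolation (probe : String) : List (String × String) :=
  [("check", "probe_isolation"),
   ("missing_probe", probe),
   ("detail", "held_out has no pairs for " ++ probe)]

-- p["probe_id"] raises KeyError when absent; Pre_ guarantees the key is present, so getD "" is exact there.
def pvPid (p : List (String × String)) : String :=
  PySem.Dict.getD (PySem.Dict.mk p) "probe_id" ""

def check_probe_isolation (held_out : List (List (String × String))) : List (List (String × String)) :=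
  let covered : PySem.Set String := PySem.Set.ofList (held_out.map pvPid)
  TARGET_PROBES.foldl
    (fun violations probe =>
      if !(PySem.Set.contains covered probe) then violations ++ [pvViolation probe]
      else violations) []

-- ===== PORT B =====
-- same KeyError note: Pre_ guarantees every entry has "probe_id", so getD "" is exact there.
def check_probe_isolation_alt (held_out : List (List (String × String))) : List (List (String × String)) :=
  let remaining : List String :=
    held_out.foldl
      (fun rem p =>
        let pid := pvPid p
        if rem.contains pid then (PySem.List.remove? rem pid).getD rem else rem)
      TARGET_PROBES
  remaining.map pvViolation

-- ===== PRECONDITION & SPEC =====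
-- Pre_ excludes inputs where some entry lacks the "probe_id" key, on which A raises KeyError.
def Pre_check_probe_isolation (held_out : List (List (String × String))) : Prop :=
  held_out.all (fun p => PySem.Dict.contains (PySem.Dict.mk p) "probe_id") = true
instance (held_out : List (List (String × String))) : Decidable (Pre_check_probe_isolation held_out) := by unfold Pre_check_probe_isolation; infer_instance
def pvWitness_check_probe_isolation : (List (List (String × String))) :=
  [[("probe_id", "PROBE-E01")], [("probe_id", "x"), ("y", "z")]]

def Spec_check_probe_isolation (held_out : List (List (String × String))) (out : List (List (String × String))) : Prop := out = check_probe_isolation_alt held_out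
instance (held_out : List (List (String × String))) (out : List (List (String × String))) : Decidable (Spec_check_probe_isolation held_out out) := by unfold Spec_check_probe_isolation; infer_instance

-- ===== CLAIM =====
def Claim_equal_check_probe_isolation : Prop := ∀ (held_out : List (List (String × String))), Dom_check_probe_isolation held_out → Pre_check_probe_isolation held_out → Spec_check_probe_isolation held_out (check_probe_isolation held_out)

-- ===== LEMMAS AND PROOFS =====
-- one subtraction step = dropping that pid from a duplicate-free worklist
theorem pv_step_eq_filter (rem : List String) (hnd : rem.Nodup) (pid : String) :
    (if rem.contains pid then (PySem.List.remove? rem pid).getD rem else rem)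
      = rem.filter (fun x => x != pid) := by
  by_cases h : pid ∈ rem
  · rw [if_pos (by simpa using h), PySem.List.remove?_eq_some_erase (v := pid) (xs := rem) h, Option.getD_some,
      List.Nodup.erase_eq_filter hnd]
  · rw [if_neg (by simpa using h)]
    exact (List.filter_eq_self.mpr (fun x hx => by
      simp only [bne_iff_ne, ne_eq]
      rintro rfl; exact h hx)).symm

-- the whole pass over held_out = filtering the worklist by "no entry has this pid"
theorem pv_fold_eq_filter (held_out : List (List (String × String))) (rem : List String)
    (hnd : rem.Nodup) :
    held_out.foldl
      (fun rem p =>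
        let pid := pvPid p
        if rem.contains pid then (PySem.List.remove? rem pid).getD rem else rem) rem
    = rem.filter (fun x => !(held_out.any (fun p => pvPid p == x))) := by
  induction held_out generalizing rem with
  | nil => simp
  | cons q rest ih =>
    simp only [List.foldl_cons]
    rw [pv_step_eq_filter rem hnd (pvPid q), ih _ (hnd.filter _), List.filter_filter]
    refine List.filter_congr (fun x _ => ?_)
    simp only [List.any_cons, Bool.not_or, bne, BEq.comm (a := pvPid q) (b := x)]
    exact Bool.and_comm _ _

-- membership in the precomputed set = the direct existence test
theorem pv_covered_eq_any (held_out : List (List (String × String))) (probe : String) :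
    PySem.Set.contains (PySem.Set.ofList (held_out.map pvPid)) probe
    = held_out.any (fun p => pvPid p == probe) := by
  rw [Bool.eq_iff_iff]
  simp only [PySem.Set.contains, List.elem_iff, PySem.Set.mem_ofList, List.mem_map,
    List.any_eq_true, beq_iff_eq]

-- ===== VERDICT =====
theorem check_probe_isolation_spec : Claim_equal_check_probe_isolation := by
  intro held_out _ _
  unfold Spec_check_probe_isolation check_probe_isolation check_probe_isolation_alt
  rw [PySem.List.foldl_append_if, pv_fold_eq_filter held_out TARGET_PROBES (by decide)]
  simp only [pv_covered_eq_any, List.nil_append]
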